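-- pv_equiv track=rewrite | github.com/Kdelphinus/Python_study | 연습문제/Level 3/최고의 집합.py | solution
-- ===== SOURCE A (Python) =====
-- def solution(n, s):
--     """solution
--
--     Args:
--         n (int): 원소의 개수
--         s (int): 각 원소의 합이 되어야 할 숫자
--
--     Returns:
--         answer (list): 모든 원소의 합이 s가 되면서 곱이 가장 큰 원소들이 들어있는 리스트
--     """
--     if n > s:  # 숫자가 가짓수보다 작으면 만들 수 없다
--         return [-1]
--
--     answer = []
--     tmp = n
--     # 그 숫자로 n등분한 수들의 곱이 가장 크다
--     while len(answer) < n: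
--         answer.append(s // tmp)
--         s -= answer[-1]
--         tmp -= 1
--
--     return answer
-- ===== SOURCE B (Python) =====
-- def solution(n, s):
--     if n > s:
--         return [-1]
--     if n <= 0:
--         return []
--     q, r = divmod(s, n)
--     return [q] * (n - r) + [q + 1] * r
-- ===== Notes on version B (the rewrite author's own statement) =====
-- stated objective: simpler
-- what changed: Replaces the n-step repeated floor-division loop by a single divmod and the closed-form list [q]*(n-r)+[q+1]*r.
import Mathlib
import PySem

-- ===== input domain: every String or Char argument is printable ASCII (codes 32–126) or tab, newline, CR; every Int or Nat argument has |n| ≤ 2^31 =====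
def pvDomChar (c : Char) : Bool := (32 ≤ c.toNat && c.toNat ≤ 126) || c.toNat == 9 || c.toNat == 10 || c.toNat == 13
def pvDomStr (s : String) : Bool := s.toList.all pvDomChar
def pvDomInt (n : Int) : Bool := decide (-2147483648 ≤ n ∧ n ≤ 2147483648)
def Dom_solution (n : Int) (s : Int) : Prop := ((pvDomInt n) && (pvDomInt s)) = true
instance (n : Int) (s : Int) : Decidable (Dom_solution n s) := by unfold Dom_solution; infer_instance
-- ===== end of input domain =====

-- B replaces A's repeated floor-division loop by one divmod and the closed-form [q]*(n-r)+[q+1]*r (simpler).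

-- ===== PORT A =====
-- A's while loop: each iteration appends s // tmp, subtracts it from s, decrements tmp.
-- It runs exactly max(n,0) times (len(answer) grows by 1 each turn), so the fuel is n.toNat.
def solutionLoopA (s tmp : Int) (k : Nat) : List Int :=
  match k with
  | 0 => []
  | Nat.succ k' =>
    let a := PySem.Int.floordiv s tmp
    a :: solutionLoopA (s - a) (tmp - 1) k'

def solution (n : Int) (s : Int) : List Int :=
  if n > s then [-1]
  else solutionLoopA s n n.toNat

-- ===== PORT B =====
def solution_alt (n : Int) (s : Int) : List Int :=
  if n > s then [-1]
  else if n ≤ 0 then []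
  else
    let q := PySem.Int.floordiv s n
    let r := PySem.Int.mod s n
    List.replicate (n - r).toNat q ++ List.replicate r.toNat (q + 1)

-- ===== PRECONDITION & SPEC =====
def Spec_solution (n : Int) (s : Int) (out : List Int) : Prop := out = solution_alt n s
instance (n : Int) (s : Int) (out : List Int) : Decidable (Spec_solution n s out) := by unfold Spec_solution; infer_instance

-- ===== CLAIM (what is proved, stated in full; the proofs are below) =====
def Claim_equal_solution : Prop := ∀ (n : Int) (s : Int), Dom_solution n s → Spec_solution n s (solution n s)

-- ===== LEMMAS AND PROOFS =====

lemma solutionLoopA_closed : ∀ (k : Nat) (s : Int), 0 < k →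
    solutionLoopA s (k : Int) k =
      List.replicate ((k : Int) - PySem.Int.mod s k).toNat (PySem.Int.floordiv s k)
        ++ List.replicate (PySem.Int.mod s k).toNat (PySem.Int.floordiv s k + 1) := by
  intro k
  induction k with
  | zero => intro s h; omega
  | succ k ih =>
    intro s _
    have hKpos : (0:Int) < ((k:Int) + 1) := by positivity
    have hq := rfl (a := PySem.Int.floordiv s ((k:Int) + 1))
    have hsum := PySem.Int.floordiv_mul_add_mod s ((k:Int) + 1)
    have hr0 : 0 ≤ PySem.Int.mod s ((k:Int) + 1) := PySem.Int.mod_nonneg s hKpos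
    have hrlt : PySem.Int.mod s ((k:Int) + 1) < (k:Int) + 1 := PySem.Int.mod_lt s hKpos
    generalize hQ : PySem.Int.floordiv s ((k:Int) + 1) = q at *
    generalize hR : PySem.Int.mod s ((k:Int) + 1) = r at *
    have hc : ((k + 1 : Nat) : Int) = (k:Int) + 1 := by push_cast; ring
    have hstep : solutionLoopA s (((k+1:Nat)):Int) (k+1)
        = q :: solutionLoopA (s - q) (((k+1:Nat):Int) - 1) k := by
      rw [hc, ← hQ]; rfl
    rw [hstep, hc]
    have ht : ((k:Int) + 1 - 1) = (k:Int) := by ring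
    rw [ht, hQ, hR]
    cases k with
    | zero =>
      have : r = 0 ∧ q = s := by constructor <;> omega
      obtain ⟨h1, h2⟩ := this
      simp [solutionLoopA, h1, h2]
    | succ m =>
      have hKpos' : (0:Int) < ((m+1:Nat):Int) := by positivity
      have ihq := ih (s - q) (Nat.succ_pos m)
      by_cases hcase : r < ((m+1:Nat):Int)
      · have hfd : PySem.Int.floordiv (s - q) ((m+1:Nat):Int) = q := by
          rw [PySem.Int.floordiv_eq_iff_of_pos hKpos']
          constructor <;> nlinarith [hrlt]
        have hmd : PySem.Int.mod (s - q) ((m+1:Nat):Int) = r := by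
          have h2 := PySem.Int.floordiv_mul_add_mod (s - q) ((m+1:Nat):Int)
          rw [hfd] at h2; nlinarith
        rw [ihq, hfd, hmd]
        have hrepl : ((((m+1:Nat):Int) + 1) - r).toNat = (((m+1:Nat):Int) - r).toNat + 1 := by omega
        rw [hrepl, List.replicate_succ]
        simp
      · have hrK : r = ((m+1:Nat):Int) := by omega
        have hfd : PySem.Int.floordiv (s - q) ((m+1:Nat):Int) = q + 1 := by
          rw [PySem.Int.floordiv_eq_iff_of_pos hKpos']
          constructor <;> nlinarith [hrlt, hrK]
        have hmd : PySem.Int.mod (s - q) ((m+1:Nat):Int) = 0 := by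
          have h2 := PySem.Int.floordiv_mul_add_mod (s - q) ((m+1:Nat):Int)
          rw [hfd] at h2; nlinarith [hrK]
        rw [ihq, hfd, hmd]
        have h1 : ((((m+1:Nat):Int) + 1) - r).toNat = 1 := by omega
        have h2 : (((m+1:Nat):Int) - (0:Int)).toNat = m + 1 := by omega
        rw [h1, h2, hrK]
        simp

-- ===== VERDICT (by name: the statement is the Claim_ definition above) =====
theorem solution_spec : Claim_equal_solution := by
  intro n s _
  unfold Spec_solution solution solution_alt
  by_cases h1 : n > s
  · simp [h1]
  · simp only [h1, if_false]
    by_cases h2 : n ≤ 0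
    · have : n.toNat = 0 := by omega
      simp [h2, this, solutionLoopA]
    · have hn : 0 < n := by omega
      have hcast : ((n.toNat : Nat) : Int) = n := Int.toNat_of_nonneg (by omega)
      have := solutionLoopA_closed n.toNat s (by omega)
      rw [hcast] at this
      simp [h2, this]
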